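-- pv_equiv track=rewrite | github.com/Mapet13/CarlsenBeater | chess_lib.py | count_columns_before_piece
-- ===== SOURCE A (Python) =====
-- def count_columns_before_piece(row_str, column):
--     current_column_pos = 0
--     for c in row_str:
--         current_adding = int(c) if c.isdigit() else 1
--
--         if current_column_pos + current_adding > column:
--             return current_column_pos
--
--         current_column_pos += current_adding
--
--     return current_column_pos
-- ===== SOURCE B (Python) =====
-- def count_columns_before_piece(row_str, column):
--     # Build the table of cumulative column positions, then query it:
--     # the answer is the largest cumulative position not exceeding column (0 if none).
--     positions = []
--     total = 0
--     for c in row_str: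
--         total += int(c) if c.isdigit() else 1
--         positions.append(total)
--     return max((p for p in positions if p <= column), default=0)
-- ===== Notes on version B (the rewrite author's own statement) =====
-- stated objective: alternative
-- what changed: Replaces A's early-return scan with a build-then-query decomposition: first build the table of cumulative column positions, then return the largest table entry not exceeding column (default 0).
import Mathlib
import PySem

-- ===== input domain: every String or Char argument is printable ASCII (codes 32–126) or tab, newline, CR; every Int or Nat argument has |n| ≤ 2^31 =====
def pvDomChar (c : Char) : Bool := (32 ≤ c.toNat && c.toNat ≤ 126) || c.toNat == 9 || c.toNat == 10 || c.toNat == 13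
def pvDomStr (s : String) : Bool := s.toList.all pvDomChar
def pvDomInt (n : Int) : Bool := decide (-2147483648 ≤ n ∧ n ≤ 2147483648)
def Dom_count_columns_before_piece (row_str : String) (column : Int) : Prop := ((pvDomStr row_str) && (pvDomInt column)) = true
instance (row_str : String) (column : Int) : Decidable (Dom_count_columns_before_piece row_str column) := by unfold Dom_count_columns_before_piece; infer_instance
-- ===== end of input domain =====

-- B replaces A's early-return scan by building the cumulative-position table and querying
-- the largest entry ≤ column (objective: alternative decomposition, same cost).

-- ===== PORT A =====
-- A's loop with its early return; int(c) on a single digit char is exactly c.toNat - 48.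
def pvGoA : List Char → Int → Int → Int
  | [], pos, _ => pos
  | c :: cs, pos, col =>
      let current_adding : Int := if PySem.Chars.isdigit c then ((c.toNat : Int) - 48) else 1
      if pos + current_adding > col then pos
      else pvGoA cs (pos + current_adding) col

def count_columns_before_piece (row_str : String) (column : Int) : Int :=
  pvGoA row_str.toList 0 column

-- ===== PORT B =====
-- width of one char: int(c) if c.isdigit() else 1 (int(c) on a digit char is c.toNat - 48)
def pvWidth (c : Char) : Int := if PySem.Chars.isdigit c then ((c.toNat : Int) - 48) else 1

-- the `positions` table: cumulative sums of widths
def pvPositions : List Char → Int → List Int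
  | [], _ => []
  | c :: cs, total => (total + pvWidth c) :: pvPositions cs (total + pvWidth c)

-- max(gen, default=0) over the entries ≤ column
def count_columns_before_piece_alt (row_str : String) (column : Int) : Int :=
  (PySem.List.max? ((pvPositions row_str.toList 0).filter (fun p => decide (p ≤ column)))
      (fun p => p)).getD 0

-- ===== PRECONDITION & SPEC =====
def Spec_count_columns_before_piece (row_str : String) (column : Int) (out : Int) : Prop := out = count_columns_before_piece_alt row_str column
instance (row_str : String) (column : Int) (out : Int) : Decidable (Spec_count_columns_before_piece row_str column out) := by unfold Spec_count_columns_before_piece; infer_instance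

-- ===== CLAIM (what is proved, stated in full; the proofs are below) =====
def Claim_equal_count_columns_before_piece : Prop := ∀ (row_str : String) (column : Int), Dom_count_columns_before_piece row_str column → Spec_count_columns_before_piece row_str column (count_columns_before_piece row_str column)

-- ===== LEMMAS AND PROOFS =====

lemma pvWidth_nonneg (c : Char) : 0 ≤ pvWidth c := by
  unfold pvWidth
  split
  · rename_i h
    have : 48 ≤ c.toNat ∧ c.toNat ≤ 57 := by
      revert h
      simp [PySem.Chars.isdigit, Char.le_def]
      intro h1 h2
      constructor <;> exact_mod_cast ‹_›
    omega
  · omega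

lemma pvPositions_lb (cs : List Char) (s : Int) : ∀ p ∈ pvPositions cs s, s ≤ p := by
  induction cs generalizing s with
  | nil => simp [pvPositions]
  | cons c cs ih =>
    intro p hp
    simp only [pvPositions, List.mem_cons] at hp
    have hw := pvWidth_nonneg c
    rcases hp with rfl | hp
    · omega
    · have := ih (s + pvWidth c) p hp
      omega

lemma pvGoA_eq (cs : List Char) (pos col : Int) (h : pos ≤ col) :
    pvGoA cs pos col = ((pvPositions cs pos).filter (fun p => decide (p ≤ col))).foldl max pos := by
  induction cs generalizing pos with
  | nil => simp [pvGoA, pvPositions]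
  | cons c cs ih =>
    have hw := pvWidth_nonneg c
    simp only [pvGoA, pvPositions]
    by_cases hgt : pos + pvWidth c > col
    · have hhead : ¬ (pos + pvWidth c ≤ col) := by omega
      have htail : (pvPositions cs (pos + pvWidth c)).filter (fun p => decide (p ≤ col)) = [] := by
        apply List.filter_eq_nil_iff.mpr
        intro p hp
        have := pvPositions_lb cs (pos + pvWidth c) p hp
        simp
        omega
      simp only [pvWidth] at hgt hhead htail ⊢
      rw [if_pos hgt]
      simp [hhead, htail]
    · have hle : pos + pvWidth c ≤ col := by omega
      have hmax : max pos (pos + pvWidth c) = pos + pvWidth c := by omega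
      simp only [pvWidth] at hle hmax hgt ⊢
      rw [if_neg hgt]
      rw [ih _ hle]
      simp [hle, List.foldl_cons, hmax]

lemma foldl_max_zero_of_nonneg (x : Int) (t : List Int) (hx : 0 ≤ x) :
    List.foldl max 0 (x :: t) = List.foldl max x t := by
  simp [List.foldl_cons, max_eq_right hx]

-- ===== VERDICT (by name: the statement is the Claim_ definition above) =====
theorem count_columns_before_piece_spec : Claim_equal_count_columns_before_piece := by
  intro row_str column _
  unfold Spec_count_columns_before_piece count_columns_before_piece count_columns_before_piece_alt
  by_cases hcol : 0 ≤ column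
  · rw [pvGoA_eq _ _ _ hcol]
    cases hfil : (pvPositions row_str.toList 0).filter (fun p => decide (p ≤ column)) with
    | nil => simp [PySem.List.max?]
    | cons x t =>
      rw [PySem.List.max?_id_cons, Option.getD_some]
      have hx : 0 ≤ x := by
        have hxmem : x ∈ (pvPositions row_str.toList 0).filter (fun p => decide (p ≤ column)) := by
          rw [hfil]; exact List.mem_cons_self
        exact pvPositions_lb _ _ x (List.mem_filter.mp hxmem).1
      exact foldl_max_zero_of_nonneg x t hx
  · -- column < 0: A returns 0 immediately (widths are nonnegative), B's filter is empty
    have hA : pvGoA row_str.toList 0 column = 0 := by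
      cases row_str.toList with
      | nil => simp [pvGoA]
      | cons c cs =>
        have hw := pvWidth_nonneg c
        simp only [pvGoA, pvWidth] at hw ⊢
        rw [if_pos (by omega)]
    have hfil : (pvPositions row_str.toList 0).filter (fun p => decide (p ≤ column)) = [] := by
      apply List.filter_eq_nil_iff.mpr
      intro p hp
      have := pvPositions_lb row_str.toList 0 p hp
      simp
      omega
    rw [hA, hfil]
    simp [PySem.List.max?]
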